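-- pv_equiv track=rewrite | github.com/tagore8661/accenture-coding-practice | Problem-33.py | toss_and_score
-- ===== SOURCE A (Python) =====
-- def toss_and_score(str):
--     count = 0
--     count_head = 0
--     for i in str:
--         if i == 'H':
--             count += 2
--             count_head +=1
--             if count_head == 3:
--                 break
--         else:
--             count -= 1
--             count_head = 0
--     return count
-- ===== SOURCE B (Python) =====
-- def toss_and_score(str):
--     idx = str.find('HHH')
--     end = idx + 3 if idx != -1 else len(str)
--     return sum(2 if c == 'H' else -1 for c in str[:end])
-- ===== Notes on version B (the rewrite author's own statement) =====
-- stated objective: alternative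
-- what changed: A's single fused loop that accumulates the score while counting consecutive heads and breaking is replaced by a two-phase decomposition: locate the stopping point with str.find('HHH') (three consecutive heads are exactly that substring, since the counter resets on any non-H), then score the slice up to that point in one comprehension.
import Mathlib
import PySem

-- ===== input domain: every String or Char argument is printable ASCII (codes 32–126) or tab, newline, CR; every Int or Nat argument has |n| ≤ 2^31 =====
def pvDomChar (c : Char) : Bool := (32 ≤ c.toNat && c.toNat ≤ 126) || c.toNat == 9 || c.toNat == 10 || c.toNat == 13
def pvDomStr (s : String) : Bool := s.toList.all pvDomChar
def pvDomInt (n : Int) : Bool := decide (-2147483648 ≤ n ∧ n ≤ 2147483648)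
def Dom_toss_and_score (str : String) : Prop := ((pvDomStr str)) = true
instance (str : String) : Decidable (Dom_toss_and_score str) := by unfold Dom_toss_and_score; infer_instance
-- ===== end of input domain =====

-- B replaces A's fused accumulate-and-break loop by locating the stop with str.find('HHH') and scoring a slice in a second pass (alternative decomposition, same result).

-- ===== PORT A =====
def tossLoop : List Char → Int → Nat → Int
  | [], count, _ => count
  | c :: rest, count, countHead =>
    if c = 'H' then
      if countHead + 1 = 3 then count + 2
      else tossLoop rest (count + 2) (countHead + 1)
    else tossLoop rest (count - 1) 0

def toss_and_score (str : String) : Int := tossLoop str.toList 0 0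

-- ===== PORT B =====
def toss_and_score_alt (str : String) : Int :=
  let idx := PySem.Str.find str "HHH"
  let e : Int := if idx ≠ -1 then idx + 3 else PySem.Str.len str
  (((PySem.Str.slice str none (some e)).toList).map (fun c => if c = 'H' then (2 : Int) else -1)).sum

-- ===== PRECONDITION & SPEC =====
def Spec_toss_and_score (str : String) (out : Int) : Prop := out = toss_and_score_alt str
instance (str : String) (out : Int) : Decidable (Spec_toss_and_score str out) := by unfold Spec_toss_and_score; infer_instance

-- ===== CLAIM (what is proved, stated in full; the proofs are below) =====
def Claim_equal_toss_and_score : Prop := ∀ (str : String), Dom_toss_and_score str → Spec_toss_and_score str (toss_and_score str)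

-- ===== LEMMAS AND PROOFS =====

def pvHHH : List Char := ['H', 'H', 'H']

-- B's stopping bound, as a Nat on the char list
def pvEndB (l : List Char) : Nat :=
  if PySem.Chars.find l pvHHH = -1 then l.length else (PySem.Chars.find l pvHHH).toNat + 3

-- A's stopping position, read off A's loop structure
def pvStop : List Char → Nat → Nat
  | [], _ => 0
  | c :: rest, ch =>
    if c = 'H' then (if ch + 1 = 3 then 1 else pvStop rest (ch + 1) + 1)
    else pvStop rest 0 + 1

-- A's loop = start value + score of the prefix up to A's stopping position
lemma pvL1 : ∀ (l : List Char) (count : Int) (ch : Nat),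
    tossLoop l count ch =
      count + ((l.take (pvStop l ch)).map (fun c => if c = 'H' then (2 : Int) else -1)).sum := by
  intro l
  induction l with
  | nil => intro count ch; simp [tossLoop, pvStop]
  | cons c r ih =>
    intro count ch
    by_cases hc : c = 'H'
    · by_cases h3 : ch + 1 = 3
      · simp [tossLoop, pvStop, hc, h3]
      · simp [tossLoop, pvStop, hc, h3, ih]; ring
    · simp [tossLoop, pvStop, hc, ih]; ring

lemma pv_find_prefix_zero (l : List Char) (hp : pvHHH <+: l) :
    PySem.Chars.find l pvHHH = 0 := by
  have hinf : pvHHH <:+: l := hp.isInfix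
  have h0 : 0 ≤ PySem.Chars.find l pvHHH := (PySem.Chars.find_nonneg_iff _ _).mpr hinf
  obtain ⟨hpre, hmin⟩ := PySem.Chars.find_spec h0
  by_contra hne
  have hpos : 0 < (PySem.Chars.find l pvHHH).toNat := by omega
  exact (hmin 0 hpos) (by simpa using hp)

-- peeling one character that does not start an occurrence shifts find by one
lemma pv_peel (c : Char) (r : List Char) (hc : ¬ pvHHH <+: (c :: r)) :
    PySem.Chars.find (c :: r) pvHHH =
      if PySem.Chars.find r pvHHH = -1 then -1 else PySem.Chars.find r pvHHH + 1 := by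
  by_cases h : PySem.Chars.find r pvHHH = -1
  · rw [if_pos h, PySem.Chars.find_eq_neg_one_iff] at *
    intro hinf
    rcases List.infix_cons_iff.mp hinf with hp | hi
    · exact hc hp
    · exact h hi
  · rw [if_neg h]
    have hr0 : 0 ≤ PySem.Chars.find r pvHHH := by
      have := PySem.Chars.neg_one_le_find r pvHHH; omega
    obtain ⟨hp, hmin⟩ := PySem.Chars.find_spec hr0
    set f := (PySem.Chars.find r pvHHH).toNat with hf
    have hinfr : pvHHH <:+: r := hp.isInfix.trans (List.drop_suffix f r).isInfix
    have hg0 : 0 ≤ PySem.Chars.find (c :: r) pvHHH :=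
      (PySem.Chars.find_nonneg_iff _ _).mpr (List.infix_cons hinfr)
    obtain ⟨hgp, hgmin⟩ := PySem.Chars.find_spec hg0
    set g := (PySem.Chars.find (c :: r) pvHHH).toNat with hgdef
    have hgne : g ≠ 0 := by
      intro h0; rw [h0] at hgp; exact hc (by simpa using hgp)
    obtain ⟨j, hj⟩ : ∃ j, g = j + 1 := ⟨g - 1, by omega⟩
    have hoccj : pvHHH <+: r.drop j := by
      rw [hj] at hgp; simpa using hgp
    have h1 : f ≤ j := by by_contra hlt; exact (hmin j (by omega)) hoccj
    have h2 : g ≤ f + 1 := by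
      by_contra hlt
      exact (hgmin (f + 1) (by omega)) (by simpa using hp)
    have hgf : g = f + 1 := by omega
    have := Int.toNat_of_nonneg hg0
    have := Int.toNat_of_nonneg hr0
    omega

lemma pvEndB_peel (c : Char) (r : List Char) (hc : ¬ pvHHH <+: (c :: r)) :
    pvEndB (c :: r) = pvEndB r + 1 := by
  unfold pvEndB
  rw [pv_peel c r hc]
  by_cases h : PySem.Chars.find r pvHHH = -1
  · simp [h]
  · have hr0 : 0 ≤ PySem.Chars.find r pvHHH := by
      have := PySem.Chars.neg_one_le_find r pvHHH; omega
    have hne : PySem.Chars.find r pvHHH + 1 ≠ -1 := by omega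
    simp only [if_neg h, if_neg hne]
    have h1 := Int.toNat_of_nonneg hr0
    have h2 := Int.toNat_of_nonneg (a := PySem.Chars.find r pvHHH + 1) (by omega)
    omega

lemma pv_no_hhh_short (l : List Char) (h : l.length < 3) : PySem.Chars.find l pvHHH = -1 := by
  rw [PySem.Chars.find_eq_neg_one_iff]
  intro hinf
  have := hinf.length_le
  simp [pvHHH] at this
  omega

-- the two stopping bounds agree (strong induction on the length, case tree on the first ≤ 3 chars)
lemma pvStop_eq_endB_aux : ∀ (n : Nat) (l : List Char), l.length ≤ n → pvStop l 0 = pvEndB l := by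
  intro n
  induction n with
  | zero =>
    intro l h
    have : l = [] := List.eq_nil_of_length_eq_zero (by omega)
    subst this
    simp [pvStop, pvEndB, pv_no_hhh_short]
  | succ n ih =>
    intro l hlen
    match l with
    | [] => simp [pvStop, pvEndB, pv_no_hhh_short]
    | c :: r =>
      by_cases hc : c = 'H'
      · subst hc
        match r with
        | [] => simp [pvStop, pvEndB, pv_no_hhh_short]
        | c2 :: r2 =>
          by_cases hc2 : c2 = 'H'
          · subst hc2
            match r2 with
            | [] => simp [pvStop, pvEndB, pv_no_hhh_short]
            | c3 :: r3 =>
              by_cases hc3 : c3 = 'H'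
              · subst hc3
                have hpre : pvHHH <+: ('H' :: 'H' :: 'H' :: r3) := by
                  simp [pvHHH, List.cons_prefix_cons]
                simp [pvStop, pvEndB, pv_find_prefix_zero _ hpre]
              · have h1 : ¬ pvHHH <+: (c3 :: r3) := by
                  simp [pvHHH, List.cons_prefix_cons]; exact fun h => absurd h.symm hc3
                have h2 : ¬ pvHHH <+: ('H' :: c3 :: r3) := by
                  simp [pvHHH, List.cons_prefix_cons]; exact fun h => absurd h.symm hc3
                have h3 : ¬ pvHHH <+: ('H' :: 'H' :: c3 :: r3) := by
                  simp [pvHHH, List.cons_prefix_cons]; exact fun h => absurd h.symm hc3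
                rw [pvEndB_peel _ _ h3, pvEndB_peel _ _ h2, pvEndB_peel _ _ h1]
                simp at hlen
                rw [← ih r3 (by omega)]
                simp [pvStop, hc3]
          · have h1 : ¬ pvHHH <+: (c2 :: r2) := by
              simp [pvHHH, List.cons_prefix_cons]; exact fun h => absurd h.symm hc2
            have h2 : ¬ pvHHH <+: ('H' :: c2 :: r2) := by
              simp [pvHHH, List.cons_prefix_cons]; exact fun h => absurd h.symm hc2
            rw [pvEndB_peel _ _ h2, pvEndB_peel _ _ h1]
            simp at hlen
            rw [← ih r2 (by omega)]
            simp [pvStop, hc2]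
      · have h1 : ¬ pvHHH <+: (c :: r) := by
          simp [pvHHH, List.cons_prefix_cons]; exact fun h => absurd h.symm hc
        rw [pvEndB_peel _ _ h1]
        simp at hlen
        rw [← ih r (by omega)]
        simp [pvStop, hc]

lemma pvStop_eq_endB (l : List Char) : pvStop l 0 = pvEndB l :=
  pvStop_eq_endB_aux l.length l le_rfl

-- B's port = score of the prefix up to B's stopping bound
lemma pv_alt_eq (str : String) :
    toss_and_score_alt str =
      ((str.toList.take (pvEndB str.toList)).map (fun c => if c = 'H' then (2 : Int) else -1)).sum := by
  unfold toss_and_score_alt pvEndB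
  have hfind : PySem.Str.find str "HHH" = PySem.Chars.find str.toList pvHHH := by
    simp [pvHHH]
  rw [hfind]
  by_cases h : PySem.Chars.find str.toList pvHHH = -1
  · simp only [h, ne_eq, not_true_eq_false, if_false]
    have hlen : PySem.Str.len str = (str.toList.length : Int) := by simp
    rw [hlen]
    simp [PySem.List.slice_to_natCast]
  · have hr0 : 0 ≤ PySem.Chars.find str.toList pvHHH := by
      have := PySem.Chars.neg_one_le_find str.toList pvHHH; omega
    obtain ⟨k, hk⟩ : ∃ k : Nat, PySem.Chars.find str.toList pvHHH = (k : Int) :=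
      ⟨(PySem.Chars.find str.toList pvHHH).toNat, (Int.toNat_of_nonneg hr0).symm⟩
    simp only [ne_eq, hk]
    have h3 : (k : Int) + 3 = ((k + 3 : Nat) : Int) := by push_cast; ring
    rw [h3]
    have hkne : ¬ ((k : Int) = -1) := by omega
    simp only [if_pos hkne, if_neg hkne, PySem.Str.toList_slice, PySem.Chars.slice_eq_listSlice, Int.toNat_natCast]
    rw [PySem.List.slice_to_natCast]

-- ===== VERDICT (by name: the statement is the Claim_ definition above) =====
theorem toss_and_score_spec : Claim_equal_toss_and_score := by
  intro str _
  unfold Spec_toss_and_score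
  rw [toss_and_score, pvL1, pv_alt_eq, ← pvStop_eq_endB]
  simp
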